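-- pv_equiv track=rewrite | github.com/aranajhonny/Drake-Hate | twitter_bot.py | remove_quoted_text
-- ===== SOURCE A (Python) =====
-- def remove_quoted_text(twext):
--     result = ""
--     in_quotes = False
--     for c in twext:
--         if c is '"':
--             in_quotes = not in_quotes
--             continue
--         if not in_quotes:
--             result = result + c
--     # Quotations were mismatched! Return original string.
--     if in_quotes is True:
--         return twext
--     return result
-- ===== SOURCE B (Python) =====
-- def remove_quoted_text(twext):
--     parts = twext.split('"')
--     if len(parts) % 2 == 0:
--         # odd number of quotes: mismatched, return the original string
--         return twext
--     return "".join(parts[::2])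
-- ===== Notes on version B (the rewrite author's own statement) =====
-- stated objective: simpler
-- what changed: Replaced the per-character state machine (in_quotes flag, char-by-char string concatenation) with a split on the double-quote character followed by joining the even-indexed segments, keeping the mismatched-quote fallback as a parity check on the segment count.
import Mathlib
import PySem

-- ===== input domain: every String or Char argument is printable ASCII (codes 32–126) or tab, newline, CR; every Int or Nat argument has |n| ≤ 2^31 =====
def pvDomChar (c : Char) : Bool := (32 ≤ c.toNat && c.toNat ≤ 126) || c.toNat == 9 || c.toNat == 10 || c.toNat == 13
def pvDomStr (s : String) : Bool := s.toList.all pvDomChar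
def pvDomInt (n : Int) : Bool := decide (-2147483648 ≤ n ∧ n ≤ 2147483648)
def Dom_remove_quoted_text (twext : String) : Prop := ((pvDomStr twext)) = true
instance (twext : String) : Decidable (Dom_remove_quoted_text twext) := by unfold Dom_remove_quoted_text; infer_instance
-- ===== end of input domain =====

-- B replaces A's per-character in_quotes state machine by split-on-quote + join of the
-- even-indexed segments (objective: simpler).

-- ===== PORT A =====
-- Literal port of A: fold over the characters with state (result, in_quotes);
-- `c is '"'` behaves as equality on the ASCII domain (CPython interns 1-char strings).
def remove_quoted_text (twext : String) : String :=
  let st := twext.toList.foldl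
    (fun (st : List Char × Bool) c =>
      if c == '"' then (st.1, !st.2)
      else if st.2 == false then (st.1 ++ [c], st.2) else st)
    ([], false)
  if st.2 == true then twext else String.mk st.1

-- ===== PORT B =====
-- parts[::2]: the step-2 slice, ported by hand (PySem.List.slice has no step argument); exact.
def everyOther {α : Type} : List α → List α
  | [] => []
  | [x] => [x]
  | x :: _ :: rest => x :: everyOther rest

def remove_quoted_text_alt (twext : String) : String :=
  let parts := PySem.Chars.splitOn twext.toList ['"']
  if parts.length % 2 == 0 then twext
  else String.mk (PySem.Chars.join [] (everyOther parts))

-- ===== PRECONDITION & SPEC =====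
def Spec_remove_quoted_text (twext : String) (out : String) : Prop := out = remove_quoted_text_alt twext
instance (twext : String) (out : String) : Decidable (Spec_remove_quoted_text twext out) := by unfold Spec_remove_quoted_text; infer_instance

-- ===== CLAIM (what is proved, stated in full; the proofs are below) =====
def Claim_equal_remove_quoted_text : Prop := ∀ (twext : String), Dom_remove_quoted_text twext → Spec_remove_quoted_text twext (remove_quoted_text twext)

-- ===== LEMMAS AND PROOFS =====

/-- Reference shape of splitting a char list on `'"'`. -/
def splitQ : List Char → List (List Char)
  | [] => [[]]
  | c :: t =>
    if c == '"' then [] :: splitQ t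
    else (c :: (splitQ t).headD []) :: (splitQ t).tail

theorem splitQ_ne_nil (cs : List Char) : splitQ cs ≠ [] := by
  cases cs with
  | nil => simp [splitQ]
  | cons c t => simp only [splitQ]; split <;> simp

theorem cons_headD_tail {α : Type} (p : List α) (h : p ≠ []) (d : α) :
    p.headD d :: p.tail = p := by
  cases p with
  | nil => exact absurd rfl h
  | cons a r => rfl

theorem go_spec (fuel : Nat) (l cur : List Char) (acc2 : List (List Char))
    (hf : l.length < fuel) :
    PySem.Chars.splitOn.go ['"'] fuel l cur acc2 =
      acc2.reverse ++ (cur.reverse ++ (splitQ l).headD []) :: (splitQ l).tail := by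
  induction fuel generalizing l cur acc2 with
  | zero => omega
  | succ fuel ih =>
    cases l with
    | nil => simp [PySem.Chars.splitOn.go, splitQ]
    | cons c rest =>
      by_cases hc : c = '"'
      · subst hc
        obtain ⟨h, r, hr⟩ : ∃ h r, splitQ rest = h :: r := by
          cases hsq : splitQ rest with
          | nil => exact absurd hsq (splitQ_ne_nil rest)
          | cons h r => exact ⟨h, r, rfl⟩
        have hpre : List.isPrefixOf ['"'] ('"' :: rest) = true := by
          simp [List.isPrefixOf]
        rw [PySem.Chars.splitOn.go]
        simp only [hpre, if_pos]
        have hd : List.drop (['"'] : List Char).length ('"' :: rest) = rest := rfl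
        rw [hd, ih rest [] (cur.reverse :: acc2) (by simpa using Nat.lt_of_succ_lt_succ hf)]
        simp [splitQ, hr]
      · have hpre : List.isPrefixOf ['"'] (c :: rest) = false := by
          simp [List.isPrefixOf, Ne.symm hc]
        rw [PySem.Chars.splitOn.go]
        simp only [hpre, Bool.false_eq_true, if_false]
        rw [ih rest (c :: cur) acc2 (by simpa using Nat.lt_of_succ_lt_succ hf)]
        obtain ⟨h, r, hr⟩ : ∃ h r, splitQ rest = h :: r := by
          cases hsq : splitQ rest with
          | nil => exact absurd hsq (splitQ_ne_nil rest)
          | cons h r => exact ⟨h, r, rfl⟩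
        simp [splitQ, hc, hr]

theorem splitOn_quote_eq (cs : List Char) :
    PySem.Chars.splitOn cs ['"'] = splitQ cs := by
  unfold PySem.Chars.splitOn
  rw [go_spec (cs.length + 1) cs [] [] (by omega)]
  simpa using cons_headD_tail (splitQ cs) (splitQ_ne_nil cs) []

theorem splitQ_length (cs : List Char) :
    (splitQ cs).length = cs.count '"' + 1 := by
  induction cs with
  | nil => simp [splitQ]
  | cons c t ih =>
    by_cases hc : c = '"'
    · subst hc; simp [splitQ, ih]
    · obtain ⟨h, r, hr⟩ : ∃ h r, splitQ t = h :: r := by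
        cases hsq : splitQ t with
        | nil => exact absurd hsq (splitQ_ne_nil t)
        | cons h r => exact ⟨h, r, rfl⟩
      simp [splitQ, hc, ← ih, hr]

/-- What A's loop keeps of the text, given the current quote flag. -/
def outF : Bool → List Char → List Char
  | _, [] => []
  | b, c :: t => if c == '"' then outF (!b) t else if b then outF b t else c :: outF b t

/-- A's loop body as a named function (definitionally equal to the port's lambda). -/
def stepA (st : List Char × Bool) (c : Char) : List Char × Bool :=
  if c == '"' then (st.1, !st.2) else if st.2 == false then (st.1 ++ [c], st.2) else st

theorem fold_spec (cs : List Char) (res : List Char) (b : Bool) :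
    cs.foldl stepA (res, b) = (res ++ outF b cs, b ^^ (cs.count '"' % 2 == 1)) := by
  induction cs generalizing res b with
  | nil => simp [outF]
  | cons c t ih =>
    rw [List.foldl_cons]
    by_cases hc : c = '"'
    · subst hc
      have hs : stepA (res, b) '"' = (res, !b) := by simp [stepA]
      rw [hs, ih]
      rcases Nat.mod_two_eq_zero_or_one (t.count '"') with h | h <;> cases b <;>
        simp [outF, Nat.add_mod, h]
    · cases b with
      | false =>
        have hs : stepA (res, false) c = (res ++ [c], false) := by simp [stepA, hc]
        rw [hs, ih]
        simp [outF, hc]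
      | true =>
        have hs : stepA (res, true) c = (res, true) := by simp [stepA, hc]
        rw [hs, ih]
        simp [outF, hc]

theorem fold_spec' (cs : List Char) (res : List Char) (b : Bool) :
    cs.foldl
      (fun (st : List Char × Bool) c =>
        if c == '"' then (st.1, !st.2)
        else if st.2 == false then (st.1 ++ [c], st.2) else st)
      (res, b) =
      (res ++ outF b cs, b ^^ (cs.count '"' % 2 == 1)) := fold_spec cs res b

theorem eo_flatten_cons (c : Char) (h : List Char) (r : List (List Char)) :
    (everyOther ((c :: h) :: r)).flatten = c :: (everyOther (h :: r)).flatten := by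
  cases r with
  | nil => simp [everyOther]
  | cons s r' => simp [everyOther]

theorem join_nil_eq_flatten (ps : List (List Char)) :
    PySem.Chars.join [] ps = ps.flatten := by
  induction ps with
  | nil => simp [PySem.Chars.join, List.intercalate]
  | cons a r ih =>
    cases r with
    | nil => simp [PySem.Chars.join, List.intercalate]
    | cons b r' =>
      simp only [PySem.Chars.join, List.intercalate, List.intersperse] at *
      simp [ih]

theorem eo_spec (cs : List Char) :
    (everyOther (splitQ cs)).flatten = outF false cs ∧
      (everyOther (splitQ cs).tail).flatten = outF true cs := by
  induction cs with
  | nil => simp [splitQ, everyOther, outF]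
  | cons c t ih =>
    obtain ⟨h, r, hr⟩ : ∃ h r, splitQ t = h :: r := by
      cases hsq : splitQ t with
      | nil => exact absurd hsq (splitQ_ne_nil t)
      | cons h r => exact ⟨h, r, rfl⟩
    by_cases hc : c = '"'
    · subst hc
      constructor
      · show (everyOther (splitQ ('"' :: t))).flatten = outF false ('"' :: t)
        simp only [splitQ, beq_self_eq_true, if_pos, hr, everyOther, outF]
        simpa [hr] using ih.2
      · show (everyOther (splitQ ('"' :: t)).tail).flatten = outF true ('"' :: t)
        simp only [splitQ, beq_self_eq_true, if_pos, List.tail_cons, outF]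
        exact ih.1
    · constructor
      · show (everyOther (splitQ (c :: t))).flatten = outF false (c :: t)
        have hs : splitQ (c :: t) = (c :: h) :: r := by simp [splitQ, hc, hr]
        rw [hs, eo_flatten_cons, ← hr]
        simp [outF, hc, ih.1]
      · show (everyOther (splitQ (c :: t)).tail).flatten = outF true (c :: t)
        have hs : splitQ (c :: t) = (c :: h) :: r := by simp [splitQ, hc, hr]
        rw [hs]
        have h2 := ih.2
        rw [hr] at h2
        simpa [outF, hc] using h2

-- ===== VERDICT (by name: the statement is the Claim_ definition above) =====
theorem remove_quoted_text_spec : Claim_equal_remove_quoted_text := by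
  intro twext _
  unfold Spec_remove_quoted_text remove_quoted_text remove_quoted_text_alt
  simp only [fold_spec', splitOn_quote_eq]
  rcases Nat.mod_two_eq_zero_or_one (twext.toList.count '"') with h | h
  · simp [splitQ_length, h, Nat.add_mod, join_nil_eq_flatten, (eo_spec twext.toList).1]
  · simp [splitQ_length, h, Nat.add_mod]
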